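-- pv_equiv track=rewrite | github.com/ptahproject/ptah | ptah/amdjs/handlebars.py | extract_i18n_str
-- ===== SOURCE A (Python) =====
-- def extract_i18n_str(text):
--     pos = 0
--     first = last = -1
--
--     messages = []
--
--     while 1:
--         first = text.find('{{#i18n}}', pos)
--         if first >= 0:
--             last = text.find('{{/i18n}}', first)
--             if last >= 0:
--                 pos = last + 9
--                 messages.append((first, pos, text[first + 9:last]))
--                 first = last = -1
--                 continue
--         break
--
--     return messages
-- ===== SOURCE B (Python) =====
-- def extract_i18n_str(text):
--     n = len(text)
--     opens = [i for i in range(n) if text.startswith('{{#i18n}}', i)]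
--     closes = [i for i in range(n) if text.startswith('{{/i18n}}', i)]
--     messages = []
--     pos = oi = ci = 0
--     while True:
--         while oi < len(opens) and opens[oi] < pos:
--             oi += 1
--         if oi == len(opens):
--             break
--         o = opens[oi]
--         while ci < len(closes) and closes[ci] < o:
--             ci += 1
--         if ci == len(closes):
--             break
--         c = closes[ci]
--         pos = c + 9
--         messages.append((o, pos, text[o + 9:c]))
--     return messages
-- ===== Notes on version B (the rewrite author's own statement) =====
-- stated objective: alternative
-- what changed: A interleaves text.find calls for open and close tags while threading a moving cursor; B first materialises the complete sorted lists of all open-tag and close-tag occurrence positions in two comprehension passes and then pairs them with a two-pointer merge over the index lists.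
import Mathlib
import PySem

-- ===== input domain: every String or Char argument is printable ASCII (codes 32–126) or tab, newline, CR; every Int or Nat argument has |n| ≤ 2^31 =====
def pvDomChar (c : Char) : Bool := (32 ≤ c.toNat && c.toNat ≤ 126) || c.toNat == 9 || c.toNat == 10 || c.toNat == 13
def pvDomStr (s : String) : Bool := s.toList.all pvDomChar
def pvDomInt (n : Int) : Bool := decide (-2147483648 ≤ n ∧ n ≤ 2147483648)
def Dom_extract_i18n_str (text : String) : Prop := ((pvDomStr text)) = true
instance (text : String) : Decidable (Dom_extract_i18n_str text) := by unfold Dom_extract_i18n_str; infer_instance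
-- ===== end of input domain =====

-- B precomputes the lists of all open-tag / close-tag occurrence positions and pairs them with
-- a two-pointer merge, instead of A's interleaved text.find calls; same value (objective: alternative).

-- ===== PORT A =====
-- the two tags, as code-point lists
def pvOpenTag : List Char := ['{', '{', '#', 'i', '1', '8', 'n', '}', '}']
def pvCloseTag : List Char := ['{', '{', '/', 'i', '1', '8', 'n', '}', '}']

theorem pv_find_spec (cs sub : List Char) (pos : Nat) (hle : pos ≤ cs.length)
    (h1 : 0 ≤ PySem.Chars.findFrom cs sub (pos : Int)) :
    (pos : Int) ≤ PySem.Chars.findFrom cs sub (pos : Int) ∧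
    sub <+: cs.drop (PySem.Chars.findFrom cs sub (pos : Int)).toNat ∧
    ∀ i : Nat, pos ≤ i → i < (PySem.Chars.findFrom cs sub (pos : Int)).toNat → ¬ sub <+: cs.drop i :=
  PySem.Chars.findFrom_natCast_spec cs sub pos hle (by omega)

theorem pv_len_of_prefix {cs : List Char} {k : Nat} {sub : List Char} (hs : sub.length = 9)
    (h : sub <+: cs.drop k) : k + 9 ≤ cs.length := by
  have := h.length_le
  simp [List.length_drop, hs] at this
  omega

-- Totality facts for A's loop, cited by aLoop's proof obligations: when both finds succeed,
-- the next pos (last.toNat + 9) is larger than pos and still ≤ len.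
theorem pv_find_step (cs : List Char) (pos : Nat) (hle : pos ≤ cs.length)
    (h1 : 0 ≤ PySem.Chars.findFrom cs pvOpenTag (pos : Int))
    (h2 : 0 ≤ PySem.Chars.findFrom cs pvCloseTag (PySem.Chars.findFrom cs pvOpenTag (pos : Int))) :
    pos < (PySem.Chars.findFrom cs pvCloseTag (PySem.Chars.findFrom cs pvOpenTag (pos : Int))).toNat + 9 ∧
    (PySem.Chars.findFrom cs pvCloseTag (PySem.Chars.findFrom cs pvOpenTag (pos : Int))).toNat + 9 ≤ cs.length := by
  obtain ⟨hge, hpre, _⟩ := pv_find_spec cs pvOpenTag pos hle h1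
  set f := PySem.Chars.findFrom cs pvOpenTag (pos : Int) with hf
  have hflen : f.toNat + 9 ≤ cs.length := pv_len_of_prefix (by decide) hpre
  have hfcast : f = ((f.toNat : Nat) : Int) := by omega
  rw [hfcast] at h2
  have hb : PySem.Chars.findFrom cs pvCloseTag f = PySem.Chars.findFrom cs pvCloseTag ((f.toNat : Nat) : Int) := by rw [← hfcast]
  obtain ⟨hge2, hpre2, _⟩ := pv_find_spec cs pvCloseTag f.toNat (by omega) h2
  have hllen := pv_len_of_prefix (cs := cs) (by decide : pvCloseTag.length = 9) hpre2
  constructor <;> omega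

-- A's while loop; pos only ever takes Nat values, the invariant pos ≤ len is threaded as hle.
def aLoop (cs : List Char) (pos : Nat) (hle : pos ≤ cs.length) : List (Int × Int × String) :=
  let first := PySem.Chars.findFrom cs pvOpenTag (pos : Int)
  if h1 : 0 ≤ first then
    let last := PySem.Chars.findFrom cs pvCloseTag first
    if h2 : 0 ≤ last then
      (first, last + 9, String.ofList (PySem.List.slice cs (some (first + 9)) (some last)))
        :: aLoop cs (last.toNat + 9) (pv_find_step cs pos hle h1 h2).2
    else []
  else []
termination_by cs.length - pos
decreasing_by
  have := (pv_find_step cs pos hle h1 h2).1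
  have h3 := (pv_find_step cs pos hle h1 h2).2
  omega

def extract_i18n_str (text : String) : List (Int × Int × String) :=
  aLoop text.toList 0 (Nat.zero_le _)

-- ===== PORT B =====
-- Source B's occurrence lists: [i for i in range(n) if text.startswith(tag, i)]
-- (text.startswith(tag, i) is exactly: tag is a prefix of the suffix starting at i).
def pvOcc (cs tag : List Char) : List Nat :=
  (List.range cs.length).filter (fun i => PySem.Chars.startswith (cs.drop i) tag)

-- Source B's outer `while True` loop. The two inner `while … < …: i += 1` pointer advances are
-- dropWhile on the remaining suffix of the occurrence list; the pointers oi/ci are represented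
-- by the suffixes of opens/closes they point into. The fuel only makes the recursion structural:
-- each iteration moves pos past a close tag, so len+1 steps always suffice (pv_main proves the
-- fuelled value is A's, hence fuel is never exhausted on the supplied budget).
def pairLoop (cs : List Char) : Nat → List Nat → List Nat → Nat → List (Int × Int × String)
  | 0, _, _, _ => []
  | fuel + 1, opens, closes, pos =>
    match opens.dropWhile (fun x => decide (x < pos)) with
    | [] => []
    | o :: _ =>
      match closes.dropWhile (fun x => decide (x < o)) with
      | [] => []
      | c :: _ =>
        ((o : Int), ((c : Int) + 9),
          String.ofList (PySem.List.slice cs (some ((o : Int) + 9)) (some (c : Int))))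
          :: pairLoop cs fuel (opens.dropWhile (fun x => decide (x < pos)))
              (closes.dropWhile (fun x => decide (x < o))) (c + 9)

def extract_i18n_str_alt (text : String) : List (Int × Int × String) :=
  pairLoop text.toList (text.toList.length + 1) (pvOcc text.toList pvOpenTag)
    (pvOcc text.toList pvCloseTag) 0

-- ===== PRECONDITION & SPEC =====
def Spec_extract_i18n_str (text : String) (out : List (Int × Int × String)) : Prop := out = extract_i18n_str_alt text
instance (text : String) (out : List (Int × Int × String)) : Decidable (Spec_extract_i18n_str text out) := by unfold Spec_extract_i18n_str; infer_instance

-- ===== CLAIM (what is proved, stated in full; the proofs are below) =====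
def Claim_equal_extract_i18n_str : Prop := ∀ (text : String), Dom_extract_i18n_str text → Spec_extract_i18n_str text (extract_i18n_str text)

-- ===== LEMMAS AND PROOFS =====
-- unfolding equations for pairLoop's three cases
theorem pairLoop_succ_nil (cs : List Char) (n : Nat) (opens closes : List Nat) (pos : Nat)
    (h : opens.dropWhile (fun x => decide (x < pos)) = []) :
    pairLoop cs (n + 1) opens closes pos = [] := by
  rw [pairLoop, h]

theorem pairLoop_succ_noclose (cs : List Char) (n : Nat) (opens closes : List Nat) (pos o : Nat)
    (os' : List Nat) (h1 : opens.dropWhile (fun x => decide (x < pos)) = o :: os')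
    (h2 : closes.dropWhile (fun x => decide (x < o)) = []) :
    pairLoop cs (n + 1) opens closes pos = [] := by
  rw [pairLoop, h1]; dsimp only; rw [h2]

theorem pairLoop_succ_cons (cs : List Char) (n : Nat) (opens closes : List Nat) (pos o c : Nat)
    (os' cs' : List Nat) (h1 : opens.dropWhile (fun x => decide (x < pos)) = o :: os')
    (h2 : closes.dropWhile (fun x => decide (x < o)) = c :: cs') :
    pairLoop cs (n + 1) opens closes pos =
      ((o : Int), ((c : Int) + 9),
        String.ofList (PySem.List.slice cs (some ((o : Int) + 9)) (some (c : Int))))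
        :: pairLoop cs n (o :: os') (c :: cs') (c + 9) := by
  rw [pairLoop, h1]; dsimp only; rw [h2]

-- head of a dropWhile fails the predicate
theorem pv_head_dropWhile {p : Nat → Bool} : ∀ {l : List Nat} {a : Nat} {t : List Nat},
    l.dropWhile p = a :: t → p a = false := by
  intro l
  induction l with
  | nil => intro a t h; simp [List.dropWhile] at h
  | cons x xs ih =>
    intro a t h
    by_cases hx : p x
    · rw [List.dropWhile_cons, if_pos hx] at h; exact ih h
    · rw [List.dropWhile_cons, if_neg hx] at h
      cases h; simpa using hx

theorem pv_prefix_drop_infix (s sub : List Char) (i k : Nat) (hik : i ≤ k)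
    (h : sub <+: s.drop k) : sub <:+: s.drop i := by
  have hd : s.drop k = (s.drop i).drop (k - i) := by rw [List.drop_drop]; congr 1; omega
  rw [hd] at h
  exact h.isInfix.trans (List.drop_suffix (k - i) (s.drop i)).isInfix

theorem pv_infix_drop_prefix {s sub : List Char} {i : Nat} (h : sub <:+: s.drop i) :
    ∃ j : Nat, i ≤ j ∧ sub <+: s.drop j := by
  obtain ⟨t, u, ht⟩ := h
  refine ⟨i + t.length, Nat.le_add_right _ _, ?_⟩
  have hd : s.drop (i + t.length) = (s.drop i).drop t.length := by simp [List.drop_drop]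
  rw [hd, ← ht, List.append_assoc, List.drop_left]
  exact ⟨u, rfl⟩

theorem pv_mem_occ {cs tag : List Char} {i : Nat} (hlen : tag.length = 9)
    (hp : tag <+: cs.drop i) : i ∈ pvOcc cs tag := by
  have hi : i + 9 ≤ cs.length := pv_len_of_prefix hlen hp
  unfold pvOcc
  rw [List.mem_filter]
  exact ⟨List.mem_range.mpr (by omega), by rw [PySem.Chars.startswith_iff]; exact hp⟩

theorem pv_occ_prefix {cs tag : List Char} {i : Nat} (h : i ∈ pvOcc cs tag) :
    tag <+: cs.drop i := by
  unfold pvOcc at h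
  rw [List.mem_filter] at h
  exact (PySem.Chars.startswith_iff _ _).mp h.2

theorem pv_occ_sorted (cs tag : List Char) : (pvOcc cs tag).Pairwise (· < ·) :=
  (List.pairwise_lt_range).filter _

-- dropWhile (< q) then dropWhile (< p) collapses to dropWhile (< p) when q ≤ p (any list)
theorem pv_dropWhile_dropWhile {q p : Nat} (hqp : q ≤ p) : ∀ l : List Nat,
    (l.dropWhile (fun x => decide (x < q))).dropWhile (fun x => decide (x < p))
      = l.dropWhile (fun x => decide (x < p)) := by
  intro l
  induction l with
  | nil => rfl
  | cons a t ih =>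
    by_cases ha : a < q
    · rw [List.dropWhile_cons, if_pos (by simpa using ha), ih,
        List.dropWhile_cons, if_pos (by simp; omega)]
    · rw [List.dropWhile_cons, if_neg (by simpa using ha)]

theorem pv_dropWhile_zero : ∀ l : List Nat, l.dropWhile (fun x => decide (x < 0)) = l := by
  intro l; cases l <;> simp [List.dropWhile]

theorem pv_mem_dropWhile {p : Nat → Bool} {l : List Nat} {x : Nat}
    (hx : x ∈ l) (hpx : p x = false) : x ∈ l.dropWhile p := by
  have h := List.takeWhile_append_dropWhile (p := p) (l := l)
  rw [← h] at hx
  rcases List.mem_append.mp hx with h' | h'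
  · have := List.mem_takeWhile_imp h'
    rw [hpx] at this; cases this
  · exact h'

-- empty dropWhile on the occurrence list ⇒ no occurrence at or after pos
theorem pv_occ_none {cs tag : List Char} {pos : Nat} (hlen : tag.length = 9)
    (h : (pvOcc cs tag).dropWhile (fun x => decide (x < pos)) = []) :
    ∀ i : Nat, pos ≤ i → ¬ tag <+: cs.drop i := by
  intro i hi hp
  have hmem := pv_mem_occ hlen hp
  have := List.dropWhile_eq_nil_iff.mp h i hmem
  simp at this
  omega

-- head of the dropWhile on the occurrence list = first occurrence at or after pos
theorem pv_occ_cons {cs tag : List Char} {pos o : Nat} {os' : List Nat} (hlen : tag.length = 9)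
    (h : (pvOcc cs tag).dropWhile (fun x => decide (x < pos)) = o :: os') :
    pos ≤ o ∧ tag <+: cs.drop o ∧ ∀ i : Nat, pos ≤ i → i < o → ¬ tag <+: cs.drop i := by
  have hsub : List.Sublist (o :: os') (pvOcc cs tag) := by
    rw [← h]; exact List.dropWhile_sublist _
  have homem : o ∈ pvOcc cs tag := hsub.subset List.mem_cons_self
  have hpo : tag <+: cs.drop o := pv_occ_prefix homem
  have hposo : pos ≤ o := by
    have := pv_head_dropWhile h; simp at this; omega
  refine ⟨hposo, hpo, ?_⟩
  intro i hi hio hp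
  have himem : i ∈ (pvOcc cs tag).dropWhile (fun x => decide (x < pos)) :=
    pv_mem_dropWhile (pv_mem_occ hlen hp) (by simp; omega)
  rw [h] at himem
  have hpw : (o :: os').Pairwise (· < ·) := by
    rw [← h]; exact (pv_occ_sorted cs tag).sublist (List.dropWhile_sublist _)
  rcases List.mem_cons.mp himem with rfl | hmem
  · omega
  · have := (List.pairwise_cons.mp hpw).1 i hmem
    omega

-- bridge: dropWhile emptiness / head ↔ A's findFrom
theorem pv_findFrom_none {cs tag : List Char} {pos : Nat} (hlen : tag.length = 9)
    (hle : pos ≤ cs.length)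
    (h : (pvOcc cs tag).dropWhile (fun x => decide (x < pos)) = []) :
    PySem.Chars.findFrom cs tag (pos : Int) = -1 := by
  rw [PySem.Chars.findFrom_natCast_eq_neg_one_iff cs tag pos hle]
  intro hinf
  obtain ⟨j, hj, hp⟩ := pv_infix_drop_prefix hinf
  exact pv_occ_none hlen h j hj hp

theorem pv_findFrom_cons {cs tag : List Char} {pos o : Nat} {os' : List Nat} (hlen : tag.length = 9)
    (hle : pos ≤ cs.length)
    (h : (pvOcc cs tag).dropWhile (fun x => decide (x < pos)) = o :: os') :
    PySem.Chars.findFrom cs tag (pos : Int) = (o : Int) := by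
  obtain ⟨hposo, hpo, hmin⟩ := pv_occ_cons hlen h
  have hne : PySem.Chars.findFrom cs tag (pos : Int) ≠ -1 := by
    intro hc
    rw [PySem.Chars.findFrom_natCast_eq_neg_one_iff cs tag pos hle] at hc
    exact hc (pv_prefix_drop_infix cs tag pos o hposo hpo)
  have hge : 0 ≤ PySem.Chars.findFrom cs tag (pos : Int) := by
    obtain ⟨h1, _, _⟩ := PySem.Chars.findFrom_natCast_spec cs tag pos hle hne
    omega
  obtain ⟨hge', hpre, hmin'⟩ := pv_find_spec cs tag pos hle hge
  set F := (PySem.Chars.findFrom cs tag (pos : Int)).toNat with hF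
  have h1 : ¬ F < o := fun hlt => hmin F (by omega) hlt hpre
  have h2 : ¬ o < F := fun hlt => hmin' o hposo hlt hpo
  omega

-- main loop correspondence: A's find loop = B's two-pointer merge over occurrence-list suffixes
theorem pv_main (cs : List Char) : ∀ (n pos : Nat) (hle : pos ≤ cs.length) (q q' : Nat),
    q ≤ pos → q' ≤ pos → cs.length + 1 - pos ≤ n →
    aLoop cs pos hle
      = pairLoop cs n ((pvOcc cs pvOpenTag).dropWhile (fun x => decide (x < q)))
          ((pvOcc cs pvCloseTag).dropWhile (fun x => decide (x < q'))) pos := by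
  intro n
  induction n with
  | zero => intro pos hle q q' _ _ hn; omega
  | succ n ih =>
    intro pos hle q q' hq hq' hn
    cases h1 : (pvOcc cs pvOpenTag).dropWhile (fun x => decide (x < pos)) with
    | nil =>
      rw [pairLoop_succ_nil _ _ _ _ _ (by rw [pv_dropWhile_dropWhile hq, h1]),
        aLoop, dif_neg (by rw [pv_findFrom_none (by decide) hle h1]; norm_num)]
    | cons o os' =>
      have hfirst := pv_findFrom_cons (by decide) hle h1
      obtain ⟨hposo, hpo, _⟩ := pv_occ_cons (by decide) h1
      have holen : o + 9 ≤ cs.length := pv_len_of_prefix (by decide) hpo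
      cases h2 : (pvOcc cs pvCloseTag).dropWhile (fun x => decide (x < o)) with
      | nil =>
        rw [pairLoop_succ_noclose _ _ _ _ _ _ _ (by rw [pv_dropWhile_dropWhile hq, h1])
            (by rw [pv_dropWhile_dropWhile (by omega : q' ≤ o), h2]),
          aLoop, dif_pos (by rw [hfirst]; positivity),
          dif_neg (by rw [hfirst, pv_findFrom_none (by decide) (by omega) h2]; norm_num)]
      | cons c cs' =>
        have hlast := pv_findFrom_cons (by decide) (by omega : o ≤ cs.length) h2
        obtain ⟨hoc, hpc, _⟩ := pv_occ_cons (by decide) h2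
        have hclen : c + 9 ≤ cs.length := pv_len_of_prefix (by decide) hpc
        rw [pairLoop_succ_cons _ _ _ _ _ _ _ _ _ (by rw [pv_dropWhile_dropWhile hq, h1])
            (by rw [pv_dropWhile_dropWhile (by omega : q' ≤ o), h2]),
          aLoop, dif_pos (by rw [hfirst]; positivity),
          dif_pos (by rw [hfirst, hlast]; positivity)]
        simp only [hfirst, hlast, Int.toNat_natCast]
        have hrec := ih (c + 9) (by omega) pos o (by omega) (by omega) (by omega)
        rw [h1, h2] at hrec
        rw [hrec]

-- ===== VERDICT (by name: the statement is the Claim_ definition above) =====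
theorem extract_i18n_str_spec : Claim_equal_extract_i18n_str := by
  intro text _
  unfold Spec_extract_i18n_str extract_i18n_str extract_i18n_str_alt
  rw [pv_main text.toList (text.toList.length + 1) 0 (Nat.zero_le _) 0 0 (Nat.le_refl _) (Nat.le_refl _) (by omega),
    pv_dropWhile_zero, pv_dropWhile_zero]
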